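-- pv_equiv track=rewrite | github.com/seanwatermelon/Paralell-programming | seq_longest_contiguous.py | longest_contiguous
-- ===== SOURCE A (Python) =====
-- def longest_contiguous(seq):
--     """
--     Count the length of the longest contiguous subsequences.
--
--     This function finds each contiguous subsequence in ``seq``,
--     e.g. ``aaaa`` or ``bb`` and counts its length and returns the
--     letter with the longest contiguous subsequence and its length.
--
--     It returns a dictionary with the key being the letter and the
--     value being the length of the longest subsequence. If two letters
--     have longest subsequences of the same length, both are included
--     separately in the dictionary.
--
--     Each unique letter in ``seq`` is counted separately so the
--     sequence "aabbcc" will find the longest subsequences of each of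
--     "a", "b" and "c".
--
--     If ``seq`` is empty then an empty dicitonary is returned.
--
--     Args:
--         seq (Bio.Seq.Seq): A sequence of characters.
--
--     Returns:
--         dict: The count of the longest subsequences, keyed by letter.
--
--     Examples:
--         >>> longest_contiguous("aacbbb")
--         {'b': 3}
--         >>> longest_contiguous("aabbbaabbc")
--         {'b': 3}
--         >>> longest_contiguous("aaabbbaabb")
--         {'a': 3, 'b': 3}
--     """
--
--     result_dict = {}
--
--     max_len = 0
--
--     current_char = None
--
--     current_len = 0
--
--     for char in seq:
--
--         if char == current_char:
--             current_len += 1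
--
--         else:
--             current_char = char
--             current_len = 1
--
--         if current_len > max_len:
--             max_len = current_len
--             result_dict = {current_char: max_len}
--
--         elif current_len == max_len:
--             result_dict[current_char] = max_len
--
--     return result_dict
-- ===== SOURCE B (Python) =====
-- from itertools import groupby
--
-- def longest_contiguous(seq):
--     runs = [(ch, sum(1 for _ in grp)) for ch, grp in groupby(seq)]
--     if not runs:
--         return {}
--     best = max(n for _, n in runs)
--     out = {}
--     for ch, n in runs:
--         if n == best and ch not in out:
--             out[ch] = best
--     return out
-- ===== Notes on version B (the rewrite author's own statement) =====
-- stated objective: simpler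
-- what changed: B splits seq into contiguous runs with itertools.groupby, takes the maximum run length, and then collects in one filtering pass the letters having a run of that length, instead of A's single streaming scan that resets/extends a dict while tracking current char, current run length and running maximum.
import Mathlib
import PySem

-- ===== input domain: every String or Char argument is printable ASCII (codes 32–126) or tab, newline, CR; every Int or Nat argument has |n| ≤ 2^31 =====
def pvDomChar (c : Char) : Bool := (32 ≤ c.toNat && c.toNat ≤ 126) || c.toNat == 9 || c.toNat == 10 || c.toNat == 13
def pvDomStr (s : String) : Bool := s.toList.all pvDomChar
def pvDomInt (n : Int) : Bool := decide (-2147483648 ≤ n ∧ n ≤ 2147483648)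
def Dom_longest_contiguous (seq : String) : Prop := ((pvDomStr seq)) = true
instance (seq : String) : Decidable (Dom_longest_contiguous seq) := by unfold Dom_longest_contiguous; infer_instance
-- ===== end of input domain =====

-- B replaces A's single streaming scan (dict reset/extend with running maximum) by: split into
-- contiguous runs, take the maximum run length, then one filtering pass collecting the letters
-- that have a run of that length (objective: simpler decomposition; same O(n) cost).

-- ===== PORT A =====
-- state = (result_dict, max_len, current_char, current_len); current_char starts as None.
-- In the two dict updates Python writes result_dict[current_char]; at that point current_char
-- is exactly the one-character string of the char being processed, ported as String.ofList [ch].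
def pvStepA (st : PySem.Dict String Int × Int × Option Char × Int) (ch : Char) :
    PySem.Dict String Int × Int × Option Char × Int :=
  match st with
  | (d, maxLen, cur, curLen) =>
    let (cur', curLen') : Option Char × Int :=
      if cur == some ch then (cur, curLen + 1) else (some ch, 1)
    if maxLen < curLen' then
      (PySem.Dict.empty.insert (String.ofList [ch]) curLen', curLen', cur', curLen')
    else if curLen' == maxLen then
      (d.insert (String.ofList [ch]) maxLen, maxLen, cur', curLen')
    else (d, maxLen, cur', curLen')

def longest_contiguous (seq : String) : List (String × Int) :=
  (seq.toList.foldl pvStepA (PySem.Dict.empty, 0, none, 0)).1.items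

-- ===== PORT B =====
-- itertools.groupby(seq): the list of contiguous runs as (letter, run length) pairs.
def pyRuns : List Char → List (String × Int)
  | [] => []
  | c :: cs =>
    (String.ofList [c], (1 : Int) + (cs.takeWhile (· == c)).length) :: pyRuns (cs.dropWhile (· == c))
termination_by l => l.length
decreasing_by
  simpa using Nat.lt_succ_of_le (List.length_dropWhile_le (· == c) cs)

def longest_contiguous_alt (seq : String) : List (String × Int) :=
  match pyRuns seq.toList with
  | [] => []
  | r :: rs =>
    let best : Int := (rs.map (fun p => p.2)).foldl max r.2
    ((r :: rs).foldl
        (fun (out : PySem.Dict String Int) p =>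
          if p.2 == best && !(out.contains p.1) then out.insert p.1 best else out)
        PySem.Dict.empty).items

-- ===== PRECONDITION & SPEC =====
def Spec_longest_contiguous (seq : String) (out : List (String × Int)) : Prop := out = longest_contiguous_alt seq
instance (seq : String) (out : List (String × Int)) : Decidable (Spec_longest_contiguous seq out) := by unfold Spec_longest_contiguous; infer_instance

-- ===== CLAIM (what is proved, stated in full; the proofs are below) =====
def Claim_equal_longest_contiguous : Prop := ∀ (seq : String), Dom_longest_contiguous seq → Spec_longest_contiguous seq (longest_contiguous seq)

-- ===== LEMMAS AND PROOFS =====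

-- net effect of A's loop on the runs, as a fold over the run list
def pvDictOf (rs : List (String × Int)) (d : PySem.Dict String Int) (m : Int) :
    PySem.Dict String Int :=
  match rs with
  | [] => d
  | (s, n) :: rs =>
    pvDictOf rs
      (if m < n then PySem.Dict.empty.insert s n else if n = m then d.insert s m else d)
      (max m n)

def pvBestOf (rs : List (String × Int)) (m : Int) : Int :=
  rs.foldl (fun a p => max a p.2) m

-- A's loop over n ≥ 1 further copies of the current character c (current_len = k)
theorem pvA_run (c : Char) (n : Nat) (hn : 1 ≤ n) :
    ∀ (d : PySem.Dict String Int) (m k : Int),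
      (List.replicate n c).foldl pvStepA (d, m, some c, k) =
        (if m < k + (n : Int) then PySem.Dict.empty.insert (String.ofList [c]) (k + (n : Int))
         else if k + (n : Int) = m then d.insert (String.ofList [c]) m else d,
         max m (k + (n : Int)), some c, k + (n : Int)) := by
  induction n, hn using Nat.le_induction with
  | base =>
    intro d m k
    simp only [List.replicate, List.foldl_cons, List.foldl_nil, pvStepA,
      beq_self_eq_true, if_true, Nat.cast_one, beq_iff_eq]
    split_ifs with h1 h2 <;> simp [Prod.ext_iff] <;> omega
  | succ n hn ih =>
    intro d m k
    rw [List.replicate_succ, List.foldl_cons]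
    simp only [pvStepA, beq_self_eq_true, if_true, beq_iff_eq]
    by_cases h1 : m < k + 1
    · rw [if_pos h1, ih]
      have hc1 : k + 1 < k + 1 + (n : Int) := by omega
      have hc2 : m < k + ((n : Int) + 1) := by omega
      rw [if_pos hc1, if_pos (by push_cast; omega : m < k + ((n + 1 : Nat) : Int))]
      push_cast
      simp [Prod.ext_iff]
      constructor
      · ring_nf
      · omega
    · rw [if_neg h1]
      by_cases h2 : k + 1 = m
      · rw [if_pos h2, ih]
        have hc1 : m < k + 1 + (n : Int) := by omega
        rw [if_pos hc1, if_pos (by push_cast; omega : m < k + ((n + 1 : Nat) : Int))]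
        push_cast
        simp [Prod.ext_iff]
        constructor
        · ring_nf
        · omega
      · rw [if_neg h2, ih]
        push_cast
        have e : k + 1 + (n : Int) = k + ((n : Int) + 1) := by ring
        rw [e]

-- A's loop over a fresh run of n ≥ 1 copies of c (previous character differs / is None)
theorem pvA_freshRun (c : Char) (n : Nat) (hn : 1 ≤ n)
    (d : PySem.Dict String Int) (m k : Int) (cur : Option Char) (hcur : cur ≠ some c) :
    (List.replicate n c).foldl pvStepA (d, m, cur, k) =
      (if m < (n : Int) then PySem.Dict.empty.insert (String.ofList [c]) (n : Int)
       else if (n : Int) = m then d.insert (String.ofList [c]) m else d,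
       max m (n : Int), some c, (n : Int)) := by
  obtain ⟨n, rfl⟩ : ∃ n', n = n' + 1 := ⟨n - 1, by omega⟩
  rw [List.replicate_succ, List.foldl_cons]
  have hne : (cur == some c) = false := by
    simp [beq_eq_false_iff_ne, hcur]
  simp only [pvStepA, hne, if_false, Bool.false_eq_true, beq_iff_eq]
  rcases Nat.eq_zero_or_pos n with rfl | hn'
  · simp only [List.replicate, List.foldl_nil]
    split_ifs with h1 h2 <;> simp [Prod.ext_iff] <;> omega
  · by_cases h1 : m < 1
    · rw [if_pos h1, pvA_run c n hn']
      have hc1 : (1 : Int) < 1 + (n : Int) := by omega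
      rw [if_pos hc1, if_pos (by push_cast; omega : m < ((n + 1 : Nat) : Int))]
      push_cast
      simp [Prod.ext_iff]
      constructor
      · ring_nf
      · omega
    · rw [if_neg h1]
      by_cases h2 : (1 : Int) = m
      · rw [if_pos h2, pvA_run c n hn']
        have hc1 : m < 1 + (n : Int) := by omega
        rw [if_pos hc1, if_pos (by push_cast; omega : m < ((n + 1 : Nat) : Int))]
        push_cast
        simp [Prod.ext_iff]
        constructor
        · ring_nf
        · omega
      · rw [if_neg h2, pvA_run c n hn']
        push_cast
        have e : (1 : Int) + (n : Int) = (n : Int) + 1 := by ring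
        rw [e]

-- A's whole loop computes pvDictOf over the run decomposition
theorem pvFoldA_runs (l : List Char) :
    ∀ (d : PySem.Dict String Int) (m : Int) (cur : Option Char) (k : Int),
      (∀ c, l.head? = some c → cur ≠ some c) →
      (l.foldl pvStepA (d, m, cur, k)).1 = pvDictOf (pyRuns l) d m := by
  induction l using pyRuns.induct with
  | case1 => intro d m cur k _; simp [pyRuns, pvDictOf]
  | case2 c cs ih =>
    intro d m cur k hcur
    have hrep : cs.takeWhile (· == c) = List.replicate (cs.takeWhile (· == c)).length c := by
      apply List.eq_replicate_of_mem
      intro b hb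
      simpa using List.mem_takeWhile_imp hb
    have hd : c :: cs =
        List.replicate (1 + (cs.takeWhile (· == c)).length) c ++ cs.dropWhile (· == c) := by
      conv_lhs => rw [← List.takeWhile_append_dropWhile (p := (· == c)) (l := cs), hrep]
      rw [List.replicate_add]
      simp [List.replicate]
    conv_lhs => rw [hd]
    rw [List.foldl_append,
      pvA_freshRun c (1 + (cs.takeWhile (· == c)).length) (by omega) d m k cur (hcur c rfl)]
    have hrest : ∀ c', (cs.dropWhile (· == c)).head? = some c' → (some c : Option Char) ≠ some c' := by
      intro c' hc'
      have hne : (c' == c) = false := by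
        cases hdw : cs.dropWhile (· == c) with
        | nil => rw [hdw] at hc'; exact absurd hc' (by simp)
        | cons x xs =>
          have hx := List.head_dropWhile_not (· == c) (l := cs) (by simp [hdw])
          rw [hdw] at hc'
          simp only [List.head?_cons, Option.some.injEq] at hc'
          subst hc'
          simpa [hdw] using hx
      simp only [ne_eq, Option.some.injEq]
      intro h
      subst h
      simp at hne
    have hrun : pyRuns (c :: cs) =
        (String.ofList [c], (1 : Int) + (cs.takeWhile (· == c)).length) :: pyRuns (cs.dropWhile (· == c)) := by
      simp only [pyRuns]
    rw [hrun]
    simp only [pvDictOf]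
    have ecast : ((1 + (cs.takeWhile (· == c)).length : Nat) : Int)
        = (1 : Int) + (cs.takeWhile (· == c)).length := by push_cast; ring
    rw [ecast] at *
    exact ih _ _ _ _ hrest

theorem pvInsert_self_of_values (d : PySem.Dict String Int) (s : String) (m : Int)
    (hc : d.contains s = true) (hv : ∀ p ∈ d.items, p.2 = m) : d.insert s m = d := by
  apply PySem.Dict.ext
  rw [PySem.Dict.items_insert_of_contains _ _ hc]
  conv_rhs => rw [← List.map_id d.items]
  apply List.map_congr_left
  intro p hp
  by_cases hps : p.1 == s
  · have h1 : p.1 = s := by simpa using hps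
    have h2 : p.2 = m := hv p hp
    simp [← h1, ← h2]
  · simp [hps]

-- pvDictOf equals B's filtering pass, given the global best
theorem pvDictOf_eq_filter (rs : List (String × Int)) :
    ∀ (d : PySem.Dict String Int) (m Bv : Int),
      d.keys.Nodup → (∀ p ∈ d.items, p.2 = m) → Bv = pvBestOf rs m →
      pvDictOf rs d m =
        rs.foldl
          (fun (out : PySem.Dict String Int) p =>
            if p.2 == Bv && !(out.contains p.1) then out.insert p.1 Bv else out)
          (if m = Bv then d else PySem.Dict.empty) := by
  induction rs with
  | nil =>
    intro d m Bv hnd hv hBv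
    simp only [pvBestOf, List.foldl_nil] at hBv
    simp [pvDictOf, hBv]
  | cons r rs' ih =>
    obtain ⟨s, n⟩ := r
    intro d m Bv hnd hv hBv
    have hBv' : Bv = pvBestOf rs' (max m n) := by
      simpa [pvBestOf, List.foldl_cons] using hBv
    have hmax : max m n ≤ Bv := by
      rw [hBv']
      exact (PySem.List.le_foldl_max_int rs' (fun p => p.2) (max m n)).1
    have hm : m ≤ Bv := le_trans (le_max_left _ _) hmax
    have hn : n ≤ Bv := le_trans (le_max_right _ _) hmax
    simp only [pvDictOf, List.foldl_cons]
    by_cases h1 : m < n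
    · have hmaxn : max m n = n := by omega
      rw [if_pos h1]
      rw [ih _ _ Bv
        (PySem.Dict.nodup_keys_insert _ _ _ PySem.Dict.nodup_keys_empty)
        (by
          intro p hp
          rcases (PySem.Dict.mem_items_insert _ _ _ _).mp hp with h | ⟨h, _⟩
          · simp [h, hmaxn]
          · simp [PySem.Dict.empty] at h)
        (by rw [hBv', hmaxn])]
      rw [hmaxn]
      congr 1
      by_cases h2 : n = Bv
      · have hm' : ¬ m = Bv := by omega
        simp [h2, hm', PySem.Dict.contains_empty]
      · have hm' : ¬ m = Bv := by omega
        have : (n == Bv) = false := by simpa using h2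
        simp [h2, hm', this]
    · rw [if_neg h1]
      have hmaxm : max m n = m := by omega
      by_cases h2 : n = m
      · rw [if_pos h2]
        rw [ih _ _ Bv
          (PySem.Dict.nodup_keys_insert _ _ _ hnd)
          (by
            intro p hp
            rcases (PySem.Dict.mem_items_insert _ _ _ _).mp hp with h | ⟨h, _⟩
            · simp [h, hmaxm]
            · rw [hv p h]; exact hmaxm.symm)
          (by rw [hBv', hmaxm])]
        rw [hmaxm]
        congr 1
        by_cases h3 : m = Bv
        · rw [if_pos h3, if_pos h3]
          have hnBv : (n == Bv) = true := by simp [h2, h3]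
          by_cases h4 : d.contains s
          · rw [pvInsert_self_of_values d s m h4 hv]
            simp [hnBv, h4]
          · have h4' : d.contains s = false := by simpa using h4
            simp [hnBv, h4', h3]
        · rw [if_neg h3, if_neg h3]
          have : (n == Bv) = false := by simp [h2]; omega
          simp [this]
      · rw [if_neg h2]
        rw [ih _ _ Bv hnd (by intro p hp; rw [hv p hp]; exact hmaxm.symm) (by rw [hBv', hmaxm])]
        rw [hmaxm]
        congr 1
        have hnm : n < m := by omega
        have : (n == Bv) = false := by simp; omega
        simp [this]

-- ===== VERDICT (by name: the statement is the Claim_ definition above) =====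
theorem pyRuns_head_pos (l : List Char) (r : String × Int) (rs : List (String × Int))
    (h : pyRuns l = r :: rs) : 1 ≤ r.2 := by
  cases l with
  | nil => simp [pyRuns] at h
  | cons c cs =>
    simp only [pyRuns, List.cons.injEq] at h
    rw [← h.1]
    simp

theorem longest_contiguous_spec : Claim_equal_longest_contiguous := by
  intro seq _
  unfold Spec_longest_contiguous longest_contiguous longest_contiguous_alt
  rw [pvFoldA_runs seq.toList PySem.Dict.empty 0 none 0 (by intro c _; simp)]
  cases hr : pyRuns seq.toList with
  | nil => simp [pvDictOf, PySem.Dict.empty]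
  | cons r rs =>
    have hpos : 1 ≤ r.2 := pyRuns_head_pos _ _ _ hr
    have hbest : (rs.map (fun p => p.2)).foldl max r.2 = pvBestOf (r :: rs) 0 := by
      simp only [pvBestOf, List.foldl_cons, List.foldl_map]
      congr 1
      omega
    rw [pvDictOf_eq_filter (r :: rs) PySem.Dict.empty 0 _
      PySem.Dict.nodup_keys_empty
      (by intro p hp; simp [PySem.Dict.empty] at hp)
      hbest]
    rw [ite_self]
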